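-- pv_equiv track=rewrite | github.com/Qiskit/qiskit-addon-utils | qiskit_addon_utils/coloring/validation.py | is_valid_edge_coloring
-- ===== SOURCE A (Python) =====
-- from collections import defaultdict
--
-- def is_valid_edge_coloring(coloring: dict[tuple[int, int], int]) -> bool:
--     """Check whether an edge coloring scheme is valid.
--
--     An edge coloring is valid if no two edges of the same color share a node.
--
--     Args:
--         coloring: A mapping from edges to integer representations of colors.
--
--     Returns:
--         A boolean indicating whether the input coloring is valid.
--     """
--     node_colors: defaultdict[int, set[int]] = defaultdict(set)
--     for (n1, n2), color in coloring.items():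
--         if color in node_colors[n1] or color in node_colors[n2]:
--             return False
--         node_colors[n1].add(color)
--         node_colors[n2].add(color)
--
--     return True
-- ===== SOURCE B (Python) =====
-- def is_valid_edge_coloring(coloring: dict[tuple[int, int], int]) -> bool:
--     """Group edges by color, then check each color class has node-disjoint edges."""
--     by_color: dict[int, list[tuple[int, int]]] = {}
--     for edge, color in coloring.items():
--         by_color.setdefault(color, []).append(edge)
--     for edges in by_color.values():
--         seen: set[int] = set()
--         for n1, n2 in edges:
--             if n1 in seen or n2 in seen:
--                 return False
--             seen.add(n1)
--             seen.add(n2)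
--     return True
-- ===== Notes on version B (the rewrite author's own statement) =====
-- stated objective: alternative
-- what changed: Replaces A's single interleaved scan with a node->colors map by a two-phase algorithm: first build a color->edges index, then validate each color class independently with a fresh per-class node set.
import Mathlib
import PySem

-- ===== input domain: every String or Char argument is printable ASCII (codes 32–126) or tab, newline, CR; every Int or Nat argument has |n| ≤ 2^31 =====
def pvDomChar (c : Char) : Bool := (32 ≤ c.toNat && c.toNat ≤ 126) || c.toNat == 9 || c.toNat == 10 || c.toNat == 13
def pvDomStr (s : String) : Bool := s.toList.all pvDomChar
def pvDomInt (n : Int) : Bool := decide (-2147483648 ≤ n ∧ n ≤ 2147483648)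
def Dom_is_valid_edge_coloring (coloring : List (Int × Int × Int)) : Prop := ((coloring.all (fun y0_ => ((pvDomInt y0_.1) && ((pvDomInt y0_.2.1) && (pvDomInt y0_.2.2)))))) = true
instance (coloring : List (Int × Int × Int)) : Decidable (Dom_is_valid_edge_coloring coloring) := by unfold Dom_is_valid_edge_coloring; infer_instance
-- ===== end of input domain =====

-- B replaces A's single interleaved scan (node -> colors-seen map) by a two-phase algorithm:
-- build a color -> edges index, then validate each color class with a fresh per-class node set
-- (objective: alternative decomposition, same asymptotic cost).

-- ===== PORT A =====
-- A's dict entry ((n1, n2), color) is flattened to (n1, n2, color).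
-- defaultdict's __getitem__ inserts an empty set for a missing node before the membership
-- test; that insertion never changes any later membership answer (getD default = empty set),
-- so the state updates are ported as the two set-adding inserts alone.
def pvStateAdd (d : PySem.Dict Int (PySem.Set Int)) (n1 n2 c : Int) :
    PySem.Dict Int (PySem.Set Int) :=
  let d1 := d.insert n1 (PySem.Set.add (d.getD n1 PySem.Set.empty) c)
  d1.insert n2 (PySem.Set.add (d1.getD n2 PySem.Set.empty) c)

def pvLoopA : List (Int × Int × Int) → PySem.Dict Int (PySem.Set Int) → Bool
  | [], _ => true
  | (n1, n2, c) :: rest, d =>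
    if PySem.Set.contains (d.getD n1 PySem.Set.empty) c
        || PySem.Set.contains (d.getD n2 PySem.Set.empty) c then false
    else pvLoopA rest (pvStateAdd d n1 n2 c)

def is_valid_edge_coloring (coloring : List (Int × Int × Int)) : Bool :=
  pvLoopA coloring PySem.Dict.empty

-- ===== PORT B =====
-- phase 1: by_color.setdefault(color, []).append(edge)
def pvBuildGroups (coloring : List (Int × Int × Int)) : PySem.Dict Int (List (Int × Int)) :=
  coloring.foldl (fun d e => d.modify e.2.2 [] (fun g => g ++ [(e.1, e.2.1)])) PySem.Dict.empty

-- phase 2, inner loop: one color class against a fresh node set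
def pvCheckGroup : List (Int × Int) → PySem.Set Int → Bool
  | [], _ => true
  | (n1, n2) :: rest, seen =>
    if PySem.Set.contains seen n1 || PySem.Set.contains seen n2 then false
    else pvCheckGroup rest (PySem.Set.add (PySem.Set.add seen n1) n2)

-- phase 2, outer loop over by_color.values()
def pvCheckGroups : List (List (Int × Int)) → Bool
  | [] => true
  | g :: rest => if pvCheckGroup g PySem.Set.empty then pvCheckGroups rest else false

def is_valid_edge_coloring_alt (coloring : List (Int × Int × Int)) : Bool :=
  pvCheckGroups (PySem.Dict.values (pvBuildGroups coloring))

-- ===== PRECONDITION & SPEC =====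
def Spec_is_valid_edge_coloring (coloring : List (Int × Int × Int)) (out : Bool) : Prop := out = is_valid_edge_coloring_alt coloring
instance (coloring : List (Int × Int × Int)) (out : Bool) : Decidable (Spec_is_valid_edge_coloring coloring out) := by unfold Spec_is_valid_edge_coloring; infer_instance

-- ===== CLAIM (what is proved, stated in full; the proofs are below) =====
def Claim_equal_is_valid_edge_coloring : Prop := ∀ (coloring : List (Int × Int × Int)), Dom_is_valid_edge_coloring coloring → Spec_is_valid_edge_coloring coloring (is_valid_edge_coloring coloring)

-- ===== LEMMAS AND PROOFS =====

-- two bare edges share an endpoint (q is the later edge, p the earlier one)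
def pvShare (q p : Int × Int) : Prop :=
  q.1 = p.1 ∨ q.1 = p.2 ∨ q.2 = p.1 ∨ q.2 = p.2

-- the later colored edge f conflicts with the earlier colored edge e
def pvClash (f e : Int × Int × Int) : Prop :=
  f.2.2 = e.2.2 ∧ pvShare (f.1, f.2.1) (e.1, e.2.1)

-- the coloring is valid: no later edge clashes with an earlier one
def pvGood (l : List (Int × Int × Int)) : Prop :=
  l.Pairwise (fun e f => ¬ pvClash f e)

theorem pv_mem_stateAdd (d : PySem.Dict Int (PySem.Set Int)) (n1 n2 c n c' : Int) :
    c' ∈ (pvStateAdd d n1 n2 c).getD n PySem.Set.empty ↔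
      c' ∈ d.getD n PySem.Set.empty ∨ (c' = c ∧ (n = n1 ∨ n = n2)) := by
  unfold pvStateAdd
  simp only [PySem.Dict.getD_insert]
  split_ifs <;> simp_all [PySem.Set.mem_add]

theorem pvLoopA_true_iff (l : List (Int × Int × Int)) :
    ∀ d : PySem.Dict Int (PySem.Set Int),
      (pvLoopA l d = true ↔
        pvGood l ∧ ∀ e ∈ l, ¬ (e.2.2 ∈ d.getD e.1 PySem.Set.empty ∨
                               e.2.2 ∈ d.getD e.2.1 PySem.Set.empty)) := by
  induction l with
  | nil => intro d; simp [pvLoopA, pvGood]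
  | cons e rest ih =>
    intro d
    obtain ⟨n1, n2, c⟩ := e
    simp only [pvLoopA]
    split_ifs with h
    · simp only [Bool.or_eq_true, PySem.Set.contains_iff] at h
      simp only [false_iff]
      intro ⟨_, hall⟩
      exact hall (n1, n2, c) (List.mem_cons_self ..) h
    · simp only [Bool.or_eq_true, PySem.Set.contains_iff, not_or] at h
      rw [ih (pvStateAdd d n1 n2 c)]
      unfold pvGood
      simp only [List.pairwise_cons, List.mem_cons, forall_eq_or_imp]
      constructor
      · rintro ⟨hg, hall⟩
        refine ⟨⟨?_, hg⟩, ⟨by simpa using h, ?_⟩⟩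
        · intro f hf hc
          have := hall f hf
          rw [pv_mem_stateAdd, pv_mem_stateAdd] at this
          obtain ⟨hcol, hsh⟩ := hc
          unfold pvShare at hsh
          simp only [pvClash] at *
          tauto
        · intro f hf
          have := hall f hf
          rw [pv_mem_stateAdd, pv_mem_stateAdd] at this
          tauto
      · rintro ⟨⟨hfirst, hg⟩, _, hall⟩
        refine ⟨hg, ?_⟩
        intro f hf
        rw [pv_mem_stateAdd, pv_mem_stateAdd]
        have h1 := hfirst f hf
        have h2 := hall f hf
        simp only [pvClash, pvShare] at h1
        tauto

theorem pvA_iff (l : List (Int × Int × Int)) :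
    is_valid_edge_coloring l = true ↔ pvGood l := by
  rw [is_valid_edge_coloring, pvLoopA_true_iff]
  simp [PySem.Dict.getD_empty, PySem.Set.empty]

theorem pvCheckGroup_true_iff (g : List (Int × Int)) :
    ∀ s : PySem.Set Int,
      (pvCheckGroup g s = true ↔
        g.Pairwise (fun p q => ¬ pvShare q p) ∧ ∀ p ∈ g, p.1 ∉ s ∧ p.2 ∉ s) := by
  induction g with
  | nil => intro s; simp [pvCheckGroup]
  | cons p rest ih =>
    intro s
    obtain ⟨n1, n2⟩ := p
    simp only [pvCheckGroup]
    split_ifs with h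
    · simp only [Bool.or_eq_true, PySem.Set.contains_iff] at h
      simp only [false_iff]
      intro ⟨_, hall⟩
      have := hall (n1, n2) (List.mem_cons_self ..)
      tauto
    · simp only [Bool.or_eq_true, PySem.Set.contains_iff, not_or] at h
      rw [ih]
      simp only [List.pairwise_cons, List.mem_cons, forall_eq_or_imp]
      constructor
      · rintro ⟨hg, hall⟩
        refine ⟨⟨?_, hg⟩, ⟨h, ?_⟩⟩
        · intro q hq hsh
          have := hall q hq
          simp only [PySem.Set.mem_add] at this
          unfold pvShare at hsh
          tauto
        · intro q hq
          have := hall q hq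
          simp only [PySem.Set.mem_add] at this
          tauto
      · rintro ⟨⟨hfirst, hg⟩, _, hall⟩
        refine ⟨hg, ?_⟩
        intro q hq
        simp only [PySem.Set.mem_add]
        have h1 := hfirst q hq
        have h2 := hall q hq
        simp only [pvShare] at h1
        tauto

theorem pvCheckGroups_true_iff (gs : List (List (Int × Int))) :
    pvCheckGroups gs = true ↔ ∀ g ∈ gs, pvCheckGroup g PySem.Set.empty = true := by
  induction gs with
  | nil => simp [pvCheckGroups]
  | cons g rest ih =>
    simp only [pvCheckGroups, List.mem_cons, forall_eq_or_imp]
    split_ifs with h <;> simp [PySem.Set.empty] at h <;> simp [PySem.Set.empty, h, ih]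

theorem pvBuildGroups_getD (l : List (Int × Int × Int)) (c : Int) :
    (pvBuildGroups l).getD c [] =
      (l.filter (fun e => e.2.2 == c)).map (fun e => (e.1, e.2.1)) := by
  unfold pvBuildGroups
  have : l.foldl (fun d e => d.modify e.2.2 [] (fun g => g ++ [(e.1, e.2.1)])) PySem.Dict.empty
      = (l.map (fun e => (e.2.2, (e.1, e.2.1)))).foldl
          (fun d p => d.modify p.1 [] (fun g => g ++ [p.2])) PySem.Dict.empty := by
    rw [List.foldl_map]
  rw [this, PySem.Dict.getD_foldl_modify_append]
  simp [PySem.Dict.getD_empty, List.filter_map, Function.comp_def]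

theorem pvBuildGroups_keys (l : List (Int × Int × Int)) :
    (pvBuildGroups l).keys = PySem.Set.ofList (l.map (fun e => e.2.2)) := by
  unfold pvBuildGroups
  rw [PySem.Dict.keys_foldl_modify_key]
  simp [PySem.Dict.keys_empty, PySem.Set.update, PySem.Set.ofList_eq_foldl]

theorem pv_forall_values {κ ν : Type} [BEq κ] [LawfulBEq κ] (d : PySem.Dict κ ν)
    (dflt : ν) (P : ν → Prop) (hnd : d.keys.Nodup) :
    (∀ v ∈ PySem.Dict.values d, P v) ↔ ∀ k ∈ PySem.Dict.keys d, P (d.getD k dflt) := by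
  simp only [PySem.Dict.values, PySem.Dict.keys, List.mem_map]
  constructor
  · rintro h k ⟨⟨k', v⟩, hm, rfl⟩
    rw [PySem.Dict.getD_of_mem_items d hm hnd]
    exact h v ⟨(k', v), hm, rfl⟩
  · rintro h v ⟨⟨k, v'⟩, hm, rfl⟩
    have := h k ⟨(k, v'), hm, rfl⟩
    rwa [PySem.Dict.getD_of_mem_items d hm hnd] at this

theorem pvGood_iff_groups (l : List (Int × Int × Int)) :
    pvGood l ↔ ∀ c ∈ l.map (fun e => e.2.2),
      ((l.filter (fun e => e.2.2 == c)).map (fun e => (e.1, e.2.1))).Pairwise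
        (fun p q => ¬ pvShare q p) := by
  constructor
  · intro hg c _
    rw [List.pairwise_map, List.pairwise_filter]
    rw [pvGood, List.pairwise_iff_forall_sublist] at hg
    rw [List.pairwise_iff_forall_sublist]
    intro e f hsub he hf hsh
    exact hg hsub ⟨by simp at he hf; omega, hsh⟩
  · intro h
    rw [pvGood, List.pairwise_iff_forall_sublist]
    intro e f hsub ⟨hcol, hsh⟩
    have he : e ∈ l := hsub.subset (List.mem_cons_self ..)
    have hc : e.2.2 ∈ l.map (fun e => e.2.2) := List.mem_map_of_mem he
    have := h e.2.2 hc
    rw [List.pairwise_map, List.pairwise_filter, List.pairwise_iff_forall_sublist] at this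
    exact this hsub (by simp) (by simp [hcol]) hsh

theorem pvB_iff (l : List (Int × Int × Int)) :
    is_valid_edge_coloring_alt l = true ↔ pvGood l := by
  rw [is_valid_edge_coloring_alt, pvCheckGroups_true_iff]
  have hnd : (pvBuildGroups l).keys.Nodup := by
    rw [pvBuildGroups_keys]; exact PySem.Set.nodup_ofList _
  rw [pv_forall_values (pvBuildGroups l) [] _ hnd, pvGood_iff_groups]
  constructor
  · intro h c hc
    have hk : c ∈ (pvBuildGroups l).keys := by
      rw [pvBuildGroups_keys, PySem.Set.mem_ofList]; exact hc
    have := h c hk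
    rw [pvCheckGroup_true_iff, pvBuildGroups_getD] at this
    exact this.1
  · intro h k hk
    rw [pvBuildGroups_keys, PySem.Set.mem_ofList] at hk
    rw [pvCheckGroup_true_iff, pvBuildGroups_getD]
    exact ⟨h k hk, by simp [PySem.Set.empty]⟩

-- ===== VERDICT (by name: the statement is the Claim_ definition above) =====
theorem is_valid_edge_coloring_spec : Claim_equal_is_valid_edge_coloring := by
  intro coloring _
  unfold Spec_is_valid_edge_coloring
  exact Bool.coe_iff_coe.mp ((pvA_iff coloring).trans (pvB_iff coloring).symm)
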